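-- pv_equiv track=rewrite | github.com/minnseong/Algorithm | programmers/Test/LINE_Q4.py | solution
-- ===== SOURCE A (Python) =====
-- def solution(arr, brr):
--
--     result = 0
--
--     for i in range(len(arr)-1):
--         if arr[i] > brr[i]:
--             diff = arr[i] - brr[i]
--             arr[i] = brr[i]
--             arr[i+1] += diff
--             result += 1
--
--         elif arr[i] < brr[i]:
--             diff = brr[i] - arr[i]
--             arr[i] = brr[i]
--             arr[i+1] -= diff
--             result += 1
--
--     return result
-- ===== SOURCE B (Python) =====
-- def solution(arr, brr):
--     # Prefix-sum reformulation: position i needs an adjustment exactly when the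
--     # running sums of arr and brr over 0..i differ (the loop in A just pushes
--     # that difference along as a carry).  Return value only: unlike A, this
--     # does not mutate arr.
--     result = 0
--     carry = 0
--     for a, b in zip(arr[:-1], brr):
--         carry += a - b
--         if carry != 0:
--             result += 1
--     return result
-- ===== Notes on version B (the rewrite author's own statement) =====
-- stated objective: simpler
-- what changed: Replaces A's in-place carry propagation through arr (writing arr[i] and arr[i+1] each step) with a pure single pass that keeps one running prefix-sum difference (carry) and counts the positions where it is nonzero; B does not mutate arr (the claim is about the return value only).
import Mathlib
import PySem

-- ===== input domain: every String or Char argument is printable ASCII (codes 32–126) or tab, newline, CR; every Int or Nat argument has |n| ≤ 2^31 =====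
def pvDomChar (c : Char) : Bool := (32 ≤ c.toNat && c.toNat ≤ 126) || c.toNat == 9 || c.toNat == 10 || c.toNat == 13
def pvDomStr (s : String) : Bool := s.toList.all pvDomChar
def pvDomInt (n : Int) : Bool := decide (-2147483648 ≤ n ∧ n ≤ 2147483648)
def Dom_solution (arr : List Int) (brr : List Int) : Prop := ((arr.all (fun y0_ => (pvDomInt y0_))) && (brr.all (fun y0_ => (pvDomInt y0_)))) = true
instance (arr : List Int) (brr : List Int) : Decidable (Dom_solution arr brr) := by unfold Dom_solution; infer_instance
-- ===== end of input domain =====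

-- B replaces A's in-place carry propagation through arr with a pure single pass over
-- zip(arr[:-1], brr) keeping one running prefix-sum difference; equivalence is about the
-- RETURN value only (A mutates arr in place, B does not).

-- ===== PORT A =====
-- the body of A's for-loop over i, carrying the mutable state (arr, result)
def stepA (brr : List Int) (st : List Int × Int) (i : Int) : List Int × Int :=
  let a := st.1
  let result := st.2
  if PySem.List.pyGetD a i 0 > PySem.List.pyGetD brr i 0 then
    let diff := PySem.List.pyGetD a i 0 - PySem.List.pyGetD brr i 0
    let a := PySem.List.pySetD a i (PySem.List.pyGetD brr i 0)
    let a := PySem.List.pySetD a (i + 1) (PySem.List.pyGetD a (i + 1) 0 + diff)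
    (a, result + 1)
  else if PySem.List.pyGetD a i 0 < PySem.List.pyGetD brr i 0 then
    let diff := PySem.List.pyGetD brr i 0 - PySem.List.pyGetD a i 0
    let a := PySem.List.pySetD a i (PySem.List.pyGetD brr i 0)
    let a := PySem.List.pySetD a (i + 1) (PySem.List.pyGetD a (i + 1) 0 - diff)
    (a, result + 1)
  else (a, result)

def solution (arr : List Int) (brr : List Int) : Int :=
  ((PySem.List.pyRange 0 ((arr.length : Int) - 1) 1).foldl (stepA brr) (arr, 0)).2

-- ===== PORT B =====
-- the body of B's for-loop over zip(arr[:-1], brr), carrying (result, carry)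
def stepB (st : Int × Int) (p : Int × Int) : Int × Int :=
  let carry := st.2 + (p.1 - p.2)
  (if carry ≠ 0 then st.1 + 1 else st.1, carry)

def solution_alt (arr : List Int) (brr : List Int) : Int :=
  ((List.zip (PySem.List.slice arr none (some (-1))) brr).foldl stepB (0, 0)).1

-- ===== PRECONDITION & SPEC =====
-- A reads brr[i] for every i < len(arr)-1 and raises IndexError when brr is shorter.
def Pre_solution (arr : List Int) (brr : List Int) : Prop := arr.length ≤ brr.length + 1
instance (arr : List Int) (brr : List Int) : Decidable (Pre_solution arr brr) := by unfold Pre_solution; infer_instance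
def pvWitness_solution : List Int × List Int := ([1, 2, 4], [2, 1, 4])


def Spec_solution (arr : List Int) (brr : List Int) (out : Int) : Prop := out = solution_alt arr brr
instance (arr : List Int) (brr : List Int) (out : Int) : Decidable (Spec_solution arr brr out) := by unfold Spec_solution; infer_instance

-- ===== CLAIM (what is proved, stated in full; the proofs are below) =====
def Claim_equal_solution : Prop := ∀ (arr : List Int) (brr : List Int), Dom_solution arr brr → Pre_solution arr brr → Spec_solution arr brr (solution arr brr)

-- ===== LEMMAS AND PROOFS =====

-- carry after m steps = difference of the prefix sums of length m
def pvCarry (arr brr : List Int) (m : Nat) : Int := (arr.take m).sum - (brr.take m).sum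

-- number of adjustments among the first m positions
def pvCnt (arr brr : List Int) : Nat → Int
  | 0 => 0
  | m + 1 => pvCnt arr brr m + (if pvCarry arr brr (m + 1) ≠ 0 then 1 else 0)

lemma pvCarry_zero (arr brr : List Int) : pvCarry arr brr 0 = 0 := by
  simp [pvCarry]

lemma pvCarry_succ (arr brr : List Int) (m : Nat) (h1 : m < arr.length) (h2 : m < brr.length) :
    pvCarry arr brr (m + 1) = pvCarry arr brr m + (arr.getD m 0 - brr.getD m 0) := by
  unfold pvCarry
  rw [List.take_add_one, List.take_add_one, List.getElem?_eq_getElem h1, List.getElem?_eq_getElem h2]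
  simp [List.getD, h1, h2]
  ring


lemma take_len (brr : List Int) (m : Nat) (h : m ≤ brr.length) : (brr.take m).length = m := by
  simp [List.length_take, h]

lemma stepA_eval (arr brr : List Int) (c : Int) (m : Nat)
    (h1 : m + 1 < arr.length) (h2 : m < brr.length) :
    stepA brr (brr.take m ++ (arr.getD m 0 + pvCarry arr brr m) :: arr.drop (m + 1), c) (m : Int)
      = (brr.take (m + 1) ++ (arr.getD (m + 1) 0 + pvCarry arr brr (m + 1)) :: arr.drop (m + 2),
         c + (if pvCarry arr brr (m + 1) ≠ 0 then 1 else 0)) := by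
  have hlen : (brr.take m).length = m := take_len brr m (by omega)
  have hcast : (m : Int) + 1 = ((m + 1 : Nat) : Int) := by push_cast; ring
  have hdrop : arr.drop (m + 1) = arr[m + 1]'(h1) :: arr.drop (m + 2) := List.drop_eq_getElem_cons h1
  have hga : (brr.take m ++ (arr.getD m 0 + pvCarry arr brr m) :: arr.drop (m + 1)).getD m 0
      = arr.getD m 0 + pvCarry arr brr m := by
    rw [List.getD_append_right _ _ _ _ (by omega)]
    simp [hlen, List.getD]
  have hgb : brr.getD m 0 = brr[m] := List.getD_eq_getElem _ _ h2
  have htake : brr.take (m + 1) = brr.take m ++ [brr[m]] := by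
    rw [List.take_add_one, List.getElem?_eq_getElem h2]; rfl
  have hcs : pvCarry arr brr (m + 1) = pvCarry arr brr m + (arr.getD m 0 - brr.getD m 0) :=
    pvCarry_succ arr brr m (by omega) h2
  have hset1 : (brr.take m ++ (arr.getD m 0 + pvCarry arr brr m) :: arr.drop (m + 1)).set m brr[m]
      = brr.take m ++ brr[m] :: arr.drop (m + 1) := by
    rw [List.set_append, if_neg (by omega), hlen, Nat.sub_self, List.set_cons_zero]
  have hga2 : (brr.take m ++ brr[m] :: arr.drop (m + 1)).getD (m + 1) 0 = arr.getD (m + 1) 0 := by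
    rw [List.getD_append_right _ _ _ _ (by omega)]
    have hone : (m + 1) - (List.take m brr).length = 1 := by omega
    rw [hone, hdrop, List.getD_eq_getElem _ _ h1]
    simp only [List.getD, List.getElem?_cons_succ, List.getElem?_cons_zero, Option.getD_some]
  have hset2 : ∀ v : Int, (brr.take m ++ brr[m] :: arr.drop (m + 1)).set (m + 1) v
      = brr.take (m + 1) ++ v :: arr.drop (m + 2) := by
    intro v
    rw [List.set_append, if_neg (by omega), hlen]
    have h21 : m + 1 - m = 1 := by omega
    rw [h21, hdrop, htake, List.set_cons_succ, List.set_cons_zero, List.append_assoc]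
    rfl
  unfold stepA
  simp only [PySem.List.pyGetD_natCast, PySem.List.pySetD_natCast, hcast, hga, hgb]
  by_cases hgt : arr.getD m 0 + pvCarry arr brr m > brr[m]
  · rw [if_pos hgt]
    simp only [hset1, hga2, hset2]
    have hc : pvCarry arr brr (m + 1) ≠ 0 := by rw [hcs, hgb]; omega
    rw [if_pos hc]
    have e : arr.getD (m + 1) 0 + (arr.getD m 0 + pvCarry arr brr m - brr[m])
        = arr.getD (m + 1) 0 + pvCarry arr brr (m + 1) := by rw [hcs, hgb]; ring
    rw [e]
  · rw [if_neg hgt]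
    by_cases hlt : arr.getD m 0 + pvCarry arr brr m < brr[m]
    · rw [if_pos hlt]
      simp only [hset1, hga2, hset2]
      have hc : pvCarry arr brr (m + 1) ≠ 0 := by rw [hcs, hgb]; omega
      rw [if_pos hc]
      have e : arr.getD (m + 1) 0 - (brr[m] - (arr.getD m 0 + pvCarry arr brr m))
          = arr.getD (m + 1) 0 + pvCarry arr brr (m + 1) := by rw [hcs, hgb]; ring
      rw [e]
    · rw [if_neg hlt]
      have heq : arr.getD m 0 + pvCarry arr brr m = brr[m] := by omega
      have hc : pvCarry arr brr (m + 1) = 0 := by rw [hcs, hgb]; omega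
      rw [hc]
      have e : arr.getD (m + 1) 0 + 0 = arr[m + 1]'h1 := by
        rw [List.getD_eq_getElem _ _ h1]; ring
      rw [e, htake, heq, hdrop]
      simp only [Prod.mk.injEq, List.append_assoc, List.singleton_append]
      constructor <;> simp

lemma foldA_range (arr brr : List Int) (hne : arr ≠ []) (hb : arr.length - 1 ≤ brr.length) :
    ∀ m, m ≤ arr.length - 1 →
    (PySem.List.pyRange 0 (m : Int) 1).foldl (stepA brr) (arr, 0)
      = (brr.take m ++ (arr.getD m 0 + pvCarry arr brr m) :: arr.drop (m + 1), pvCnt arr brr m) := by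
  have hpos : 0 < arr.length := List.length_pos_iff.mpr hne
  intro m hm
  induction m with
  | zero =>
    rw [PySem.List.pyRange_one_eq_nil (by omega)]
    have h0 : arr.getD 0 0 + pvCarry arr brr 0 = arr[0]'hpos := by
      rw [pvCarry_zero, List.getD_eq_getElem _ _ hpos]; ring
    have harr : arr = arr[0]'hpos :: arr.drop (0 + 1) := by
      have h := List.drop_eq_getElem_cons (l := arr) (i := 0) hpos
      simpa using h
    simp only [List.foldl_nil, List.take_zero, List.nil_append, h0]
    rw [← harr]
    rfl
  | succ k ih =>
    have hk : k ≤ arr.length - 1 := by omega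
    have hcast : ((k + 1 : Nat) : Int) = (k : Int) + 1 := by push_cast; ring
    rw [hcast, PySem.List.pyRange_one_succ_right (by positivity), List.foldl_append]
    rw [ih hk]
    simp only [List.foldl_cons, List.foldl_nil]
    rw [stepA_eval arr brr (pvCnt arr brr k) k (by omega) (by omega)]
    rfl

lemma foldB_take (arr brr : List Int) :
    ∀ m, m ≤ (List.zip arr.dropLast brr).length →
    ((List.zip arr.dropLast brr).take m).foldl stepB (0, 0)
      = (pvCnt arr brr m, pvCarry arr brr m) := by
  intro m hm
  induction m with
  | zero => simp [pvCnt, pvCarry]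
  | succ k ih =>
    have hlen : (List.zip arr.dropLast brr).length = min (arr.length - 1) brr.length := by
      simp [List.length_zip, List.length_dropLast]
    have hk1 : k < arr.length - 1 := by omega
    have hk2 : k < brr.length := by omega
    have hkz : k < (List.zip arr.dropLast brr).length := by omega
    have hkd : k < arr.dropLast.length := by simp [List.length_dropLast]; omega
    rw [List.take_add_one, List.getElem?_eq_getElem hkz, List.foldl_append, ih (by omega)]
    have hz : (List.zip arr.dropLast brr)[k] = (arr.dropLast[k], brr[k]) := List.getElem_zip ..
    have hd : arr.dropLast[k]'hkd = arr[k]'(by omega) := List.getElem_dropLast ..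
    simp only [Option.toList_some, List.foldl_cons, List.foldl_nil, hz, hd, stepB]
    have hcs : pvCarry arr brr (k + 1) = pvCarry arr brr k + (arr.getD k 0 - brr.getD k 0) :=
      pvCarry_succ arr brr k (by omega) hk2
    have hga : arr.getD k 0 = arr[k]'(by omega) := List.getD_eq_getElem _ _ (by omega)
    have hgb2 : brr.getD k 0 = brr[k] := List.getD_eq_getElem _ _ hk2
    have hthis : pvCarry arr brr k + (arr[k]'(by omega) - brr[k]) = pvCarry arr brr (k + 1) := by
      rw [hcs, hga, hgb2]
    rw [hthis]
    show _ = (pvCnt arr brr (k + 1), pvCarry arr brr (k + 1))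
    simp only [pvCnt, ne_eq, ite_not]
    split_ifs with h <;> simp

theorem solution_spec : Claim_equal_solution := by
  intro arr brr _ hpre
  unfold Spec_solution solution solution_alt Pre_solution at *
  rw [PySem.List.slice_to_neg_one]
  rcases eq_or_ne arr [] with h | hne
  · subst h; simp [PySem.List.pyRange_one_eq_nil]
  · have hpos : 0 < arr.length := List.length_pos_iff.mpr hne
    have hb : arr.length - 1 ≤ brr.length := by omega
    have hzlen : (List.zip arr.dropLast brr).length = arr.length - 1 := by
      simp [List.length_zip, List.length_dropLast]; omega
    have hcast : ((arr.length : Int) - 1) = ((arr.length - 1 : Nat) : Int) := by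
      push_cast [hpos]; omega
    rw [hcast, foldA_range arr brr hne hb (arr.length - 1) le_rfl]
    have := foldB_take arr brr (arr.length - 1) (by omega)
    rw [List.take_of_length_le (by omega)] at this
    rw [this]
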